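-- pv_equiv track=rewrite | github.com/saumyamishra654/raga-detection | raga_pipeline/config.py | _normalize_preprocess_argv_aliases
-- ===== SOURCE A (Python) =====
-- from typing import List, Optional, Sequence
--
-- LEGACY_PREPROCESS_INGEST_ALIASES = {
--     "youtube": "yt",
--     "record": "recording",
-- }
--
-- LEGACY_RECORD_MODE_TO_INGEST = {
--     "song": "recording",
--     "tanpura_vocal": "tanpura_recording",
-- }
--
-- def _normalize_preprocess_argv_aliases(argv: Sequence[str]) -> List[str]:
--     """Normalize legacy preprocess ingest flags/values to canonical tokens."""
--     normalized: List[str] = []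
--     pending_record_mode_ingest: Optional[str] = None
--     ingest_value_index: Optional[int] = None
--     idx = 0
--
--     while idx < len(argv):
--         token = str(argv[idx])
--
--         if token == "--record-mode":
--             if idx + 1 < len(argv):
--                 record_mode_value = str(argv[idx + 1]).strip()
--                 pending_record_mode_ingest = LEGACY_RECORD_MODE_TO_INGEST.get(
--                     record_mode_value,
--                     record_mode_value,
--                 )
--                 idx += 2
--             else:
--                 idx += 1
--             continue
--
--         if token.startswith("--record-mode="):
--             record_mode_value = token.split("=", 1)[1].strip()
--             pending_record_mode_ingest = LEGACY_RECORD_MODE_TO_INGEST.get(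
--                 record_mode_value,
--                 record_mode_value,
--             )
--             idx += 1
--             continue
--
--         if token == "--ingest":
--             normalized.append(token)
--             if idx + 1 < len(argv):
--                 raw_value = str(argv[idx + 1]).strip()
--                 mapped_value = LEGACY_PREPROCESS_INGEST_ALIASES.get(raw_value, raw_value)
--                 normalized.append(mapped_value)
--                 ingest_value_index = len(normalized) - 1
--                 idx += 2
--             else:
--                 idx += 1
--             continue
--
--         if token.startswith("--ingest="):
--             raw_value = token.split("=", 1)[1].strip()
--             mapped_value = LEGACY_PREPROCESS_INGEST_ALIASES.get(raw_value, raw_value)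
--             normalized.append(f"--ingest={mapped_value}")
--             ingest_value_index = len(normalized) - 1
--             idx += 1
--             continue
--
--         normalized.append(token)
--         idx += 1
--
--     is_preprocess = any(token == "preprocess" for token in normalized)
--     if pending_record_mode_ingest and is_preprocess:
--         if ingest_value_index is not None:
--             ingest_token = normalized[ingest_value_index]
--             if ingest_token.startswith("--ingest="):
--                 normalized[ingest_value_index] = f"--ingest={pending_record_mode_ingest}"
--             else:
--                 normalized[ingest_value_index] = pending_record_mode_ingest
--         else:
--             normalized.extend(["--ingest", pending_record_mode_ingest])
--
--     return normalized
-- ===== SOURCE B (Python) =====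
-- from typing import List, Optional, Sequence, Tuple
--
-- LEGACY_PREPROCESS_INGEST_ALIASES = {
--     "youtube": "yt",
--     "record": "recording",
-- }
--
-- LEGACY_RECORD_MODE_TO_INGEST = {
--     "song": "recording",
--     "tanpura_vocal": "tanpura_recording",
-- }
--
--
-- def _parse_events(argv: Sequence[str]) -> List[Tuple[str, str]]:
--     """Tokenize argv into (kind, value) events: 'rm' (record-mode value),
--     'ing' (--ingest with value), 'inge' (--ingest=value), 'plain' (anything else)."""
--     events: List[Tuple[str, str]] = []
--     i, n = 0, len(argv)
--     while i < n:
--         t = str(argv[i])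
--         if t == "--record-mode":
--             if i + 1 < n:
--                 events.append(("rm", str(argv[i + 1]).strip()))
--                 i += 2
--             else:
--                 i += 1
--         elif t.startswith("--record-mode="):
--             events.append(("rm", t.split("=", 1)[1].strip()))
--             i += 1
--         elif t == "--ingest":
--             if i + 1 < n:
--                 events.append(("ing", str(argv[i + 1]).strip()))
--                 i += 2
--             else:
--                 events.append(("plain", t))
--                 i += 1
--         elif t.startswith("--ingest="):
--             events.append(("inge", t.split("=", 1)[1].strip()))
--             i += 1
--         else:
--             events.append(("plain", t))
--             i += 1
--     return events
--
--
-- def _normalize_preprocess_argv_aliases(argv: Sequence[str]) -> List[str]: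
--     """Normalize legacy preprocess ingest flags/values to canonical tokens."""
--     events = _parse_events(argv)
--
--     pending: Optional[str] = None
--     for kind, value in events:
--         if kind == "rm":
--             pending = LEGACY_RECORD_MODE_TO_INGEST.get(value, value)
--
--     out: List[str] = []
--     ingest_slot: Optional[int] = None
--     for kind, value in events:
--         if kind == "ing":
--             out.append("--ingest")
--             out.append(LEGACY_PREPROCESS_INGEST_ALIASES.get(value, value))
--             ingest_slot = len(out) - 1
--         elif kind == "inge":
--             out.append("--ingest=" + LEGACY_PREPROCESS_INGEST_ALIASES.get(value, value))
--             ingest_slot = len(out) - 1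
--         elif kind == "plain":
--             out.append(value)
--
--     if pending and "preprocess" in out:
--         if ingest_slot is not None:
--             if out[ingest_slot].startswith("--ingest="):
--                 out[ingest_slot] = "--ingest=" + pending
--             else:
--                 out[ingest_slot] = pending
--         else:
--             out.extend(["--ingest", pending])
--     return out
-- ===== Notes on version B (the rewrite author's own statement) =====
-- stated objective: alternative
-- what changed: A's single stateful while-loop (which interleaves building the output, tracking the record-mode override and the ingest slot) is replaced by a tokenizing pass that turns argv into (kind, value) events followed by two separate folds: a last-wins fold extracting the record-mode override and a build fold producing the normalized list and ingest slot, with the same final fixup.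
import Mathlib
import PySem

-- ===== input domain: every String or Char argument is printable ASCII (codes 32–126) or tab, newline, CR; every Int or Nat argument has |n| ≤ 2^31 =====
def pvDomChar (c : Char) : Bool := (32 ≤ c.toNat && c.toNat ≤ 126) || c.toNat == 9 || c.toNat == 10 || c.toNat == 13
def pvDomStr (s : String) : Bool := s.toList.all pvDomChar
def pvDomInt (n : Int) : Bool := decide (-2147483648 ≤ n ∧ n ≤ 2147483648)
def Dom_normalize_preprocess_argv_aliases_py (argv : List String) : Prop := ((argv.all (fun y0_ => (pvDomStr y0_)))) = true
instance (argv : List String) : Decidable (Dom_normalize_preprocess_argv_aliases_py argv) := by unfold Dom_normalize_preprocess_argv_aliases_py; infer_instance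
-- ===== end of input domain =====

-- B re-decomposes A's single stateful while-loop into a tokenizing pass producing (kind, value)
-- events plus two separate folds (last-wins record-mode override; normalized-list build); same
-- return value, objective: alternative decomposition (no speed claim).

-- module-level constants shared by both Pythons
def pvIngestAliases : PySem.Dict String String :=
  PySem.Dict.ofList [("youtube", "yt"), ("record", "recording")]
def pvRecordModeToIngest : PySem.Dict String String :=
  PySem.Dict.ofList [("song", "recording"), ("tanpura_vocal", "tanpura_recording")]

-- token.split("=", 1)[1]  (index 1 exists: only called on tokens that contain "=")
def pvSplitEq1 (t : String) : String :=
  ((PySem.Str.splitMax? t "=" 1).getD []).getD 1 ""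

-- ===== PORT A =====
-- A's while-loop: state (normalized, pending_record_mode_ingest, ingest_value_index), index idx
def pvLoopA (argv : List String) (idx : Nat) (normalized : List String)
    (pending : Option String) (ingIdx : Option Nat) :
    List String × Option String × Option Nat :=
  if h : idx < argv.length then
    let token := argv[idx]
    if token = "--record-mode" then
      if idx + 1 < argv.length then
        let v := PySem.Str.strip (argv.getD (idx + 1) "")  -- in range: idx+1 < len
        pvLoopA argv (idx + 2) normalized (some (PySem.Dict.getD pvRecordModeToIngest v v)) ingIdx
      else
        pvLoopA argv (idx + 1) normalized pending ingIdx
    else if PySem.Str.startswith token "--record-mode=" then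
      let v := PySem.Str.strip (pvSplitEq1 token)
      pvLoopA argv (idx + 1) normalized (some (PySem.Dict.getD pvRecordModeToIngest v v)) ingIdx
    else if token = "--ingest" then
      if idx + 1 < argv.length then
        let raw := PySem.Str.strip (argv.getD (idx + 1) "")  -- in range: idx+1 < len
        let mapped := PySem.Dict.getD pvIngestAliases raw raw
        let normalized' := normalized ++ [token, mapped]
        pvLoopA argv (idx + 2) normalized' pending (some (normalized'.length - 1))
      else
        pvLoopA argv (idx + 1) (normalized ++ [token]) pending ingIdx
    else if PySem.Str.startswith token "--ingest=" then
      let raw := PySem.Str.strip (pvSplitEq1 token)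
      let mapped := PySem.Dict.getD pvIngestAliases raw raw
      let normalized' := normalized ++ ["--ingest=" ++ mapped]
      pvLoopA argv (idx + 1) normalized' pending (some (normalized'.length - 1))
    else
      pvLoopA argv (idx + 1) (normalized ++ [token]) pending ingIdx
  else
    (normalized, pending, ingIdx)
termination_by argv.length - idx

def normalize_preprocess_argv_aliases_py (argv : List String) : List String :=
  let st := pvLoopA argv 0 [] none none
  let normalized := st.1
  let pending := st.2.1
  let ingIdx := st.2.2
  let isPreprocess := normalized.any (fun token => token == "preprocess")
  -- `if pending_record_mode_ingest and is_preprocess:` — Python truthiness of Optional[str]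
  if (pending.elim false (fun p => p != "")) && isPreprocess then
    match pending with
    | none => normalized  -- unreachable under the truthiness test
    | some p =>
      match ingIdx with
      | some i =>
          let ingestToken := normalized.getD i ""  -- i is in range whenever A sets it
          if PySem.Str.startswith ingestToken "--ingest=" then
            normalized.set i ("--ingest=" ++ p)
          else
            normalized.set i p
      | none => normalized ++ ["--ingest", p]
  else
    normalized

-- ===== PORT B =====
-- pass 1 of Source B: tokenize argv into (kind, value) events
def pvParseEvents (argv : List String) (i : Nat) : List (String × String) :=
  if h : i < argv.length then
    let t := argv[i]
    if t = "--record-mode" then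
      if i + 1 < argv.length then
        ("rm", PySem.Str.strip (argv.getD (i + 1) "")) :: pvParseEvents argv (i + 2)
      else
        pvParseEvents argv (i + 1)
    else if PySem.Str.startswith t "--record-mode=" then
      ("rm", PySem.Str.strip (pvSplitEq1 t)) :: pvParseEvents argv (i + 1)
    else if t = "--ingest" then
      if i + 1 < argv.length then
        ("ing", PySem.Str.strip (argv.getD (i + 1) "")) :: pvParseEvents argv (i + 2)
      else
        ("plain", t) :: pvParseEvents argv (i + 1)
    else if PySem.Str.startswith t "--ingest=" then
      ("inge", PySem.Str.strip (pvSplitEq1 t)) :: pvParseEvents argv (i + 1)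
    else
      ("plain", t) :: pvParseEvents argv (i + 1)
  else []
termination_by argv.length - i

-- pass 2 of Source B: last-wins record-mode override
def pvPendStep (p : Option String) (kv : String × String) : Option String :=
  if kv.1 = "rm" then some (PySem.Dict.getD pvRecordModeToIngest kv.2 kv.2) else p

-- pass 3 of Source B: build the output list and the ingest slot
def pvBuildStep (st : List String × Option Nat) (kv : String × String) :
    List String × Option Nat :=
  if kv.1 = "ing" then
    let out := st.1 ++ ["--ingest", PySem.Dict.getD pvIngestAliases kv.2 kv.2]
    (out, some (out.length - 1))
  else if kv.1 = "inge" then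
    let out := st.1 ++ ["--ingest=" ++ PySem.Dict.getD pvIngestAliases kv.2 kv.2]
    (out, some (out.length - 1))
  else if kv.1 = "plain" then
    (st.1 ++ [kv.2], st.2)
  else st

def normalize_preprocess_argv_aliases_py_alt (argv : List String) : List String :=
  let events := pvParseEvents argv 0
  let pending := events.foldl pvPendStep none
  let built := events.foldl pvBuildStep ([], none)
  let out := built.1
  let ingestSlot := built.2
  -- `if pending and "preprocess" in out:`
  if (pending.elim false (fun p => p != "")) && out.contains "preprocess" then
    match pending with
    | none => out  -- unreachable under the truthiness test
    | some p =>
      match ingestSlot with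
      | some i =>
          if PySem.Str.startswith (out.getD i "") "--ingest=" then  -- i in range whenever set
            out.set i ("--ingest=" ++ p)
          else
            out.set i p
      | none => out ++ ["--ingest", p]
  else
    out

-- ===== PRECONDITION & SPEC =====
def Spec_normalize_preprocess_argv_aliases_py (argv : List String) (out : List String) : Prop := out = normalize_preprocess_argv_aliases_py_alt argv
instance (argv : List String) (out : List String) : Decidable (Spec_normalize_preprocess_argv_aliases_py argv out) := by unfold Spec_normalize_preprocess_argv_aliases_py; infer_instance

-- ===== CLAIM (what is proved, stated in full; the proofs are below) =====
def Claim_equal_normalize_preprocess_argv_aliases_py : Prop := ∀ (argv : List String), Dom_normalize_preprocess_argv_aliases_py argv → Spec_normalize_preprocess_argv_aliases_py argv (normalize_preprocess_argv_aliases_py argv)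

-- ===== LEMMAS AND PROOFS =====

-- A's loop ≡ B's parse followed by the two folds, for every intermediate state
theorem pvLoopA_eq_parse (argv : List String) : ∀ (fuel idx : Nat) (normalized : List String)
    (pending : Option String) (ingIdx : Option Nat), argv.length ≤ idx + fuel →
    pvLoopA argv idx normalized pending ingIdx =
      (((pvParseEvents argv idx).foldl pvBuildStep (normalized, ingIdx)).1,
       (pvParseEvents argv idx).foldl pvPendStep pending,
       ((pvParseEvents argv idx).foldl pvBuildStep (normalized, ingIdx)).2) := by
  intro fuel
  induction fuel with
  | zero =>
      intro idx normalized pending ingIdx hle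
      have h0 : ¬ idx < argv.length := by omega
      rw [pvLoopA, pvParseEvents]
      simp [h0]
  | succ f ih =>
      intro idx normalized pending ingIdx hle
      rw [pvLoopA, pvParseEvents]
      by_cases h0 : idx < argv.length
      · simp only [dif_pos h0]
        split_ifs with hrm h1 hsw hing h2 hsw2 <;>
          · simp_all [List.foldl_cons, pvBuildStep, pvPendStep]
            exact ih _ _ _ _ (by omega)
      · simp [h0]

theorem any_eq_contains (xs : List String) :
    xs.any (fun token => token == "preprocess") = xs.contains "preprocess" := by
  induction xs with
  | nil => rfl
  | cons x xs ih => rw [List.any_cons, List.contains_cons, ih, BEq.comm]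

-- ===== VERDICT (by name: the statement is the Claim_ definition above) =====
theorem normalize_preprocess_argv_aliases_py_spec : Claim_equal_normalize_preprocess_argv_aliases_py := by
  intro argv _
  unfold Spec_normalize_preprocess_argv_aliases_py
  unfold normalize_preprocess_argv_aliases_py normalize_preprocess_argv_aliases_py_alt
  rw [pvLoopA_eq_parse argv argv.length 0 [] none none (by omega)]
  simp only [any_eq_contains]
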